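-- pv_equiv track=rewrite | github.com/Wissallefdaoui26/TP-Indexation-web-ENSAI | TP2/tp2.py | create_category_index
-- ===== SOURCE A (Python) =====
-- from typing import Dict, List, Any, Set
--
-- def create_category_index(documents: List[Dict[str, Any]]) -> Dict[str, List[str]]:
--     """Create category index by analyzing product content."""
--     category_index = {}
--
--     # Category keywords mapping
--     category_keywords = {
--         'food': ['chocolate', 'candy', 'potion', 'drink', 'beverage', 'cola', 'berry', 'flavor'],
--         'footwear': ['sneakers', 'shoes', 'boots', 'sandals', 'heel', 'footbed', 'sole'],
--         'clothing': ['beanie', 'hat', 'dress', 'shirt', 'pants', 'wardrobe', 'outfit'],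
--         'electronics': ['led', 'light', 'battery', 'electronic', 'digital'],
--         'accessories': ['accessory', 'bag', 'wallet', 'belt', 'watch'],
--         'sports': ['hiking', 'outdoor', 'running', 'sport', 'active', 'performance'],
--         'beauty': ['cream', 'perfume', 'cosmetic', 'beauty', 'skin'],
--         'home': ['furniture', 'decor', 'kitchen', 'home', 'garden']
--     }
--
--     for doc in documents:
--         url = doc.get('url', '')
--         title = doc.get('title', '').lower()
--         description = doc.get('description', '').lower()
--
--         # Determine category based on keywords
--         categories_found = []
--         for category, keywords in category_keywords.items():
--             for keyword in keywords:
--                 if keyword in title or keyword in description: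
--                     categories_found.append(category)
--                     break
--
--         # If no category found, use default
--         if not categories_found:
--             categories_found = ['other']
--
--         # Add to category index
--         for category in categories_found:
--             if category not in category_index:
--                 category_index[category] = []
--             if url not in category_index[category]:
--                 category_index[category].append(url)
--
--     # Sort URLs for each category
--     for category in category_index:
--         category_index[category].sort()
--
--     return category_index
-- ===== SOURCE B (Python) =====
-- from typing import Dict, List, Any
--
-- CATEGORY_KEYWORDS = [
--     ('food', ['chocolate', 'candy', 'potion', 'drink', 'beverage', 'cola', 'berry', 'flavor']),
--     ('footwear', ['sneakers', 'shoes', 'boots', 'sandals', 'heel', 'footbed', 'sole']),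
--     ('clothing', ['beanie', 'hat', 'dress', 'shirt', 'pants', 'wardrobe', 'outfit']),
--     ('electronics', ['led', 'light', 'battery', 'electronic', 'digital']),
--     ('accessories', ['accessory', 'bag', 'wallet', 'belt', 'watch']),
--     ('sports', ['hiking', 'outdoor', 'running', 'sport', 'active', 'performance']),
--     ('beauty', ['cream', 'perfume', 'cosmetic', 'beauty', 'skin']),
--     ('home', ['furniture', 'decor', 'kitchen', 'home', 'garden']),
-- ]
--
-- def create_category_index(documents: List[Dict[str, Any]]) -> Dict[str, List[str]]:
--     """Create category index by analyzing product content.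
--
--     Staged, dict-free decomposition: (1) flatten documents into a list of
--     (category, url) assignment pairs, matching each keyword once against the
--     combined title+description text (a '\n' separator is safe because no
--     keyword contains a newline); (2) compute the categories in order of first
--     assignment by deduplicating the pair stream; (3) for each category, one
--     scan over the pairs collects its distinct urls, emitted sorted.
--     """
--     # Pass 1: flat assignment list.
--     assignments = []
--     for doc in documents:
--         text = doc.get('title', '').lower() + '\n' + doc.get('description', '').lower()
--         cats = [c for c, kws in CATEGORY_KEYWORDS if any(k in text for k in kws)]
--         for c in (cats or ['other']):
--             assignments.append((c, doc.get('url', '')))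
--
--     # Pass 2: category order = first occurrence in the assignment stream.
--     order = []
--     for c, _ in assignments:
--         if c not in order:
--             order.append(c)
--
--     # Pass 3: per category, collect its distinct urls and sort them.
--     return {c: sorted({u for cc, u in assignments if cc == c}) for c in order}
-- ===== Notes on version B (the rewrite author's own statement) =====
-- stated objective: alternative
-- what changed: B replaces A's fused loop with its per-pair dict mutation by a dict-free staged pipeline: keywords are matched once against the combined title+'\n'+description text (instead of two separate membership tests), documents are flattened into a (category,url) pair stream, the output key order is obtained by deduplicating that stream, and each category's urls are collected by an independent scan over the pairs into a set, then sorted.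
import Mathlib
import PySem

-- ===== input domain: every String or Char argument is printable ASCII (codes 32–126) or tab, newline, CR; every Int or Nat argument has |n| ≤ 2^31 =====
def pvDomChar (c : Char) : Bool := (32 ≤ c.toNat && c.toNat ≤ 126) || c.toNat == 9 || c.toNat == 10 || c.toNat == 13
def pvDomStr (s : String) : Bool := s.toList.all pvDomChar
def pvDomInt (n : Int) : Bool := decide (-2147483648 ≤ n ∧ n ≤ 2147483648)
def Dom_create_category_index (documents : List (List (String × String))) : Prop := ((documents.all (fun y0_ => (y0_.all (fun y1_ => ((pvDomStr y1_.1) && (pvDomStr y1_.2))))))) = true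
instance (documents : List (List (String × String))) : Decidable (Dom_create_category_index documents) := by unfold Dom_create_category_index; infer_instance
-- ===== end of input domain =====

-- B is a dict-free staged pipeline (match against the combined title+'\n'+description text,
-- flatten to (category,url) pairs, dedup the stream for key order, per-category scans for the
-- url sets) replacing A's fused per-document loop with dict mutation; equal output proved below.

-- shared literal constant (the category_keywords table both sources carry verbatim)
def pvCategoryKeywords : List (String × List String) :=
  [("food", ["chocolate", "candy", "potion", "drink", "beverage", "cola", "berry", "flavor"]),
   ("footwear", ["sneakers", "shoes", "boots", "sandals", "heel", "footbed", "sole"]),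
   ("clothing", ["beanie", "hat", "dress", "shirt", "pants", "wardrobe", "outfit"]),
   ("electronics", ["led", "light", "battery", "electronic", "digital"]),
   ("accessories", ["accessory", "bag", "wallet", "belt", "watch"]),
   ("sports", ["hiking", "outdoor", "running", "sport", "active", "performance"]),
   ("beauty", ["cream", "perfume", "cosmetic", "beauty", "skin"]),
   ("home", ["furniture", "decor", "kitchen", "home", "garden"])]

-- doc.get(k, d): first-match lookup in the association list (dict convention)
def pvDocGet (doc : List (String × String)) (k d : String) : String :=
  match doc.find? (fun p => p.1 == k) with
  | some p => p.2
  | none => d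

-- ===== PORT A =====
def create_category_index (documents : List (List (String × String))) : List (String × List String) :=
  let category_index : PySem.Dict String (List String) :=
    documents.foldl (fun category_index doc =>
      let url := pvDocGet doc "url" ""
      let title := PySem.Str.lower (pvDocGet doc "title" "")
      let description := PySem.Str.lower (pvDocGet doc "description" "")
      -- inner 'for keyword … break' appends the category on the first matching keyword
      let categories_found : List String :=
        pvCategoryKeywords.foldl (fun acc ck =>
          if ck.2.any (fun kw => PySem.Str.isIn kw title || PySem.Str.isIn kw description)
          then acc ++ [ck.1] else acc) []
      let categories_found := if categories_found = [] then ["other"] else categories_found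
      categories_found.foldl (fun ci cat =>
        let ci := if ci.contains cat then ci else ci.insert cat []
        let cur := ci.getD cat []
        if cur.contains url then ci else ci.insert cat (cur ++ [url])) category_index)
    PySem.Dict.empty
  category_index.items.map (fun p => (p.1, PySem.List.sorted p.2 (fun x => x) false))

-- ===== PORT B =====
def create_category_index_alt (documents : List (List (String × String))) : List (String × List String) :=
  -- Pass 1: flat (category, url) assignment list; keywords matched once against
  -- the combined title+'\n'+description text
  let assignments : List (String × String) :=
    documents.foldl (fun assignments doc =>
      let text := PySem.Str.lower (pvDocGet doc "title" "") ++ "\n" ++ PySem.Str.lower (pvDocGet doc "description" "")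
      let cats := (pvCategoryKeywords.filter (fun ck => ck.2.any (fun kw => PySem.Str.isIn kw text))).map (fun ck => ck.1)
      assignments ++ (if cats = [] then ["other"] else cats).map (fun c => (c, pvDocGet doc "url" ""))) []
  -- Pass 2: category order = first occurrence in the assignment stream
  let order : List String :=
    assignments.foldl (fun order p => if order.contains p.1 then order else order ++ [p.1]) []
  -- Pass 3: per category, its distinct urls ({u for …} = PySem.Set), sorted
  order.map (fun c =>
    (c, PySem.List.sorted (PySem.Set.ofList ((assignments.filter (fun p => p.1 == c)).map (fun p => p.2))) (fun x => x) false))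

-- ===== PRECONDITION & SPEC =====
def Spec_create_category_index (documents : List (List (String × String))) (out : List (String × List String)) : Prop := out = create_category_index_alt documents
instance (documents : List (List (String × String))) (out : List (String × List String)) : Decidable (Spec_create_category_index documents out) := by unfold Spec_create_category_index; infer_instance

-- ===== CLAIM (what is proved, stated in full; the proofs are below) =====
def Claim_equal_create_category_index : Prop := ∀ (documents : List (List (String × String))), Dom_create_category_index documents → Spec_create_category_index documents (create_category_index documents)

-- ===== LEMMAS AND PROOFS =====

-- B's per-document text of a document
def pvText (doc : List (String × String)) : String :=
  PySem.Str.lower (pvDocGet doc "title" "") ++ "\n" ++ PySem.Str.lower (pvDocGet doc "description" "")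

-- B's per-document category list
def pvCats (doc : List (String × String)) : List String :=
  (pvCategoryKeywords.filter (fun ck => ck.2.any (fun kw => PySem.Str.isIn kw (pvText doc)))).map (fun ck => ck.1)

-- the flat (category, url) pair stream
def pvPairs (documents : List (List (String × String))) : List (String × String) :=
  documents.flatMap (fun doc =>
    (if pvCats doc = [] then ["other"] else pvCats doc).map (fun c => (c, pvDocGet doc "url" "")))

-- the per-pair dict update both loops reduce to
def pvStep (d : PySem.Dict String (List String)) (p : String × String) : PySem.Dict String (List String) :=
  d.insert p.1 (PySem.Set.add (d.getD p.1 PySem.Set.empty) p.2)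

-- ---- substring splitting at a separator absent from the needle ----

theorem pvInfixSep (kw a b : List Char) (hne : kw ≠ []) (hnl : '\n' ∉ kw) :
    kw <:+: a ++ '\n' :: b ↔ (kw <:+: a ∨ kw <:+: b) := by
  constructor
  · intro h
    induction a with
    | nil =>
      rcases List.infix_cons_iff.mp h with hp | hi
      · obtain ⟨c, kw', rfl⟩ := List.exists_cons_of_ne_nil hne
        obtain ⟨hc, -⟩ := List.cons_prefix_cons.mp hp
        exact absurd (hc ▸ List.mem_cons_self) hnl
      · exact Or.inr hi
    | cons x a' ih =>
      rcases List.infix_cons_iff.mp h with hp | hi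
      · have hp' : kw <+: (x :: a') ++ '\n' :: b := by simpa using hp
        have hlen : kw.length ≤ (x :: a').length := by
          by_contra hlt
          have hil : (x :: a').length < kw.length := Nat.lt_of_not_le hlt
          have h1 : kw[(x :: a').length] = ((x :: a') ++ '\n' :: b)[(x :: a').length]'(by
            simp) := hp'.getElem hil
          have h2 : ((x :: a') ++ '\n' :: b)[(x :: a').length]'(by simp) = '\n' := by
            rw [List.getElem_append_right (Nat.le_refl _)]
            simp
          exact hnl (by rw [← h2, ← h1]; exact List.getElem_mem hil)
        have : kw <+: x :: a' :=
          List.prefix_of_prefix_length_le hp' (List.prefix_append _ _) hlen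
        exact Or.inl this.isInfix
      · rcases ih hi with ha | hb
        · exact Or.inl (ha.trans (List.suffix_cons x a').isInfix)
        · exact Or.inr hb
  · rintro (h | h)
    · exact h.trans (List.prefix_append a ('\n' :: b)).isInfix
    · exact h.trans ((List.suffix_cons '\n' b).trans (List.suffix_append a _)).isInfix

-- every keyword in the table is nonempty and newline-free
theorem pvKwOk : ∀ ck ∈ pvCategoryKeywords, ∀ kw ∈ ck.2, kw.toList ≠ [] ∧ '\n' ∉ kw.toList := by
  decide

theorem pvAnyCongrMem {α : Type} (l : List α) (p q : α → Bool) (h : ∀ x ∈ l, p x = q x) :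
    l.any p = l.any q := by
  induction l with
  | nil => rfl
  | cons x xs ih =>
    simp only [List.any_cons, h x List.mem_cons_self,
      ih (fun y hy => h y (List.mem_cons_of_mem x hy))]

-- matching a keyword against title and description separately = against the joined text
theorem pvMatchEq (t d : String) (ck : String × List String) (hck : ck ∈ pvCategoryKeywords) :
    ck.2.any (fun kw => PySem.Str.isIn kw t || PySem.Str.isIn kw d)
    = ck.2.any (fun kw => PySem.Str.isIn kw (t ++ "\n" ++ d)) := by
  apply pvAnyCongrMem
  intro kw hkw
  obtain ⟨hne, hnl⟩ := pvKwOk ck hck kw hkw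
  have hjoin : (t ++ "\n" ++ d).toList = t.toList ++ '\n' :: d.toList := by
    simp [String.toList_append]
  rw [Bool.eq_iff_iff, Bool.or_eq_true, PySem.Str.isIn_iff_infix, PySem.Str.isIn_iff_infix,
    PySem.Str.isIn_iff_infix, hjoin]
  exact (pvInfixSep kw.toList t.toList d.toList hne hnl).symm

-- A's appending fold over the table computes B's per-document category list
theorem pvCatsEq (doc : List (String × String)) :
    pvCategoryKeywords.foldl (fun acc ck =>
      if ck.2.any (fun kw => PySem.Str.isIn kw (PySem.Str.lower (pvDocGet doc "title" "")) ||
                             PySem.Str.isIn kw (PySem.Str.lower (pvDocGet doc "description" "")))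
      then acc ++ [ck.1] else acc) []
    = pvCats doc := by
  rw [PySem.List.foldl_append_if]
  unfold pvCats pvText
  rw [List.filter_congr (fun ck hck => pvMatchEq _ _ ck hck)]
  simp

-- ---- lookups in a dict whose items are a map over its key list ----

theorem pvGetMkMap (F : String → List String) (ord : List String) (c : String) :
    (PySem.Dict.mk (ord.map (fun c' => (c', F c')))).get? c
    = if c ∈ ord then some (F c) else none := by
  induction ord with
  | nil => simp [PySem.Dict.get?]
  | cons x xs ih =>
    rw [List.map_cons, PySem.Dict.get?_mk_cons, ih]
    by_cases hx : x = c
    · subst hx; simp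
    · simp [hx, Ne.symm hx]

-- ---- foldl helpers from the loop shapes of the two programs ----

-- a foldl over g preserves an invariant each step of g preserves
theorem pvFoldlPres {α β : Type} (P : β → Prop) (g : β → α → β) (l : List α) (init : β)
    (h0 : P init) (hp : ∀ b a, P b → P (g b a)) : P (l.foldl g init) := by
  induction l generalizing init with
  | nil => exact h0
  | cons x xs ih => exact ih _ (hp _ _ h0)

-- two foldls agree when the steps agree under an invariant the second step preserves
theorem pvFoldlCongrInv {α β : Type} (P : β → Prop) (f g : β → α → β) (l : List α) (init : β)
    (h0 : P init) (hfg : ∀ b a, P b → f b a = g b a) (hp : ∀ b a, P b → P (g b a)) :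
    l.foldl f init = l.foldl g init := by
  induction l generalizing init with
  | nil => rfl
  | cons x xs ih => rw [List.foldl_cons, List.foldl_cons, hfg _ _ h0]; exact ih _ (hp _ _ h0)

-- re-inserting a key with its current value leaves a nodup-keyed dict unchanged
theorem pvInsertSelf {ν : Type} (d : PySem.Dict String ν) (k : String) (v : ν)
    (hn : d.keys.Nodup) (hc : d.contains k = true) :
    d.insert k (d.getD k v) = d := by
  cases hw : d.get? k with
  | none => rw [PySem.Dict.contains_eq_isSome_get?, hw] at hc; simp at hc
  | some w =>
    have hgd : d.getD k v = w := by rw [PySem.Dict.getD_eq_get?_getD, hw]; rfl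
    apply PySem.Dict.ext
    rw [PySem.Dict.items_insert_of_contains d _ hc]
    have hfix : ∀ p ∈ d.items, (if (p.1 == k) = true then (k, d.getD k v) else p) = p := by
      intro p hp
      obtain ⟨a, b⟩ := p
      by_cases hpk : (a == k) = true
      · have hk : a = k := by simpa using hpk
        subst hk
        have hb : d.get? a = some b := PySem.Dict.get?_of_mem_items d hp hn
        rw [hw] at hb
        simp [hgd, Option.some_inj.mp hb]
      · simp [hpk]
    rw [List.map_congr_left hfix]
    simp

-- insert preserves nodup keys
theorem pvInsertNodup {ν : Type} (d : PySem.Dict String ν) (k : String) (v : ν)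
    (hn : d.keys.Nodup) : (d.insert k v).keys.Nodup := by
  by_cases hc : d.contains k = true
  · rw [PySem.Dict.keys_insert_of_contains d v hc]; exact hn
  · rw [PySem.Dict.keys_insert_of_not_contains d v (by simpa using hc)]
    have hk : k ∉ d.keys := fun hk => hc ((PySem.Dict.contains_iff_mem_keys d k).mpr hk)
    refine List.Nodup.append hn (List.nodup_singleton k) ?_
    intro a ha hb
    rw [List.mem_singleton] at hb
    exact hk (hb ▸ ha)

-- A's per-(category,url) fused dict update equals pvStep on a nodup-keyed dict
theorem pvStepEq (d : PySem.Dict String (List String)) (c u : String) (hn : d.keys.Nodup) :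
    (let ci := if d.contains c then d else d.insert c [];
     let cur := ci.getD c [];
     if cur.contains u then ci else ci.insert c (cur ++ [u]))
    = pvStep d (c, u) := by
  unfold pvStep
  rw [PySem.Set.add_eq_ite]
  by_cases hc : d.contains c = true
  · simp only [hc, if_true, PySem.Set.empty_eq]
    by_cases hcu : u ∈ d.getD c []
    · simp only [hcu, if_true, List.contains_iff_mem]
      exact (pvInsertSelf d c [] hn hc).symm
    · simp [hcu]
  · have hc' : d.contains c = false := by simpa using hc
    have hnot : u ∉ d.getD c PySem.Set.empty := by
      rw [PySem.Dict.getD_of_not_contains d _ hc']; simp [PySem.Set.empty]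
    simp only [hc', Bool.false_eq_true, if_false, PySem.Dict.getD_insert_self, hnot]
    simp [PySem.Dict.insert_insert_self, PySem.Dict.getD_of_not_contains d _ hc',
      PySem.Set.empty]

-- set(xs + [x]) extends set(xs) by add
theorem pvOfListSnoc {α : Type} [BEq α] (xs : List α) (x : α) :
    PySem.Set.ofList (xs ++ [x]) = PySem.Set.add (PySem.Set.ofList xs) x := by
  rw [PySem.Set.ofList_eq_foldl, PySem.Set.ofList_eq_foldl, List.foldl_append]
  rfl

-- THE STRUCTURE THEOREM: the items of the pvStep-fold over a pair stream are exactly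
-- B's staged result — first-occurrence category order, each paired with the set of its urls
theorem pvFoldItems (ps : List (String × String)) :
    (ps.foldl pvStep PySem.Dict.empty).items
    = (PySem.Set.ofList (ps.map Prod.fst)).map
        (fun c => (c, PySem.Set.ofList ((ps.filter (fun p => p.1 == c)).map Prod.snd))) := by
  induction ps using List.reverseRecOn with
  | nil => rfl
  | append_singleton ps p ih =>
    obtain ⟨c, u⟩ := p
    rw [List.foldl_append]
    set D := ps.foldl pvStep PySem.Dict.empty with hD
    set ord := PySem.Set.ofList (ps.map Prod.fst) with hord
    have hDmk : D = PySem.Dict.mk (ord.map (fun c' =>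
        (c', PySem.Set.ofList ((ps.filter (fun p => p.1 == c')).map Prod.snd)))) :=
      PySem.Dict.ext ih
    have hget : D.get? c = if c ∈ ord then
        some (PySem.Set.ofList ((ps.filter (fun p => p.1 == c)).map Prod.snd)) else none := by
      rw [hDmk]; exact pvGetMkMap _ ord c
    have hordmap : (ps.map Prod.fst ++ [c]) = (ps ++ [(c, u)]).map Prod.fst := by simp
    have hFilt : ∀ c', ((ps ++ [(c, u)]).filter (fun p => p.1 == c')).map Prod.snd
        = (ps.filter (fun p => p.1 == c')).map Prod.snd ++ (if c = c' then [u] else []) := by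
      intro c'
      rw [List.filter_append, List.map_append]
      by_cases hcc : c = c' <;> simp [hcc]
    by_cases hc : c ∈ ord
    · -- known category: overwrite its set in place, order unchanged
      have hcont : D.contains c = true := by
        rw [PySem.Dict.contains_eq_isSome_get?, hget, if_pos hc]; rfl
      have hgd : D.getD c PySem.Set.empty
          = PySem.Set.ofList ((ps.filter (fun p => p.1 == c)).map Prod.snd) := by
        rw [PySem.Dict.getD_eq_get?_getD, hget, if_pos hc]; rfl
      have hord' : PySem.Set.ofList ((ps ++ [(c, u)]).map Prod.fst) = ord := by
        rw [← hordmap, pvOfListSnoc, PySem.Set.add_eq_ite, if_pos (hord ▸ hc)]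
      rw [hord']
      show (D.insert c (PySem.Set.add (D.getD c PySem.Set.empty) u)).items = _
      rw [PySem.Dict.items_insert_of_contains D _ hcont, hgd, ih, List.map_map]
      apply List.map_congr_left
      intro c' _
      simp only [Function.comp_apply]
      by_cases hcc : c' = c
      · subst hcc
        rw [if_pos (by simp), hFilt c', if_pos rfl, pvOfListSnoc]
      · rw [if_neg (by simp [hcc]), hFilt c', if_neg (fun h => hcc h.symm), List.append_nil]
    · -- new category: appended at the end of the order with a fresh singleton set
      have hcont : D.contains c = false := by
        rw [PySem.Dict.contains_eq_isSome_get?, hget, if_neg hc]; rfl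
      have hnotps : c ∉ ps.map Prod.fst := fun h => hc (hord ▸ (PySem.Set.mem_ofList _ c).mpr h)
      have hord' : PySem.Set.ofList ((ps ++ [(c, u)]).map Prod.fst) = ord ++ [c] := by
        rw [← hordmap, pvOfListSnoc, PySem.Set.add_eq_ite, if_neg (hord ▸ hc)]
      have hemptyc : (ps.filter (fun p => p.1 == c)).map Prod.snd = [] := by
        rw [List.filter_eq_nil_iff.mpr]
        · rfl
        · intro p hp hpc
          exact hnotps (List.mem_map.mpr ⟨p, hp, by simpa using hpc⟩)
      rw [hord']
      show (D.insert c (PySem.Set.add (D.getD c PySem.Set.empty) u)).items = _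
      rw [PySem.Dict.items_insert_of_not_contains D _ hcont,
        PySem.Dict.getD_of_not_contains D _ hcont, ih, List.map_append]
      congr 1
      · apply List.map_congr_left
        intro c' hc'
        have hcc : c ≠ c' := fun h => hc (h ▸ hc')
        rw [hFilt c', if_neg hcc, List.append_nil]
      · simp only [List.map_cons, List.map_nil]
        rw [hFilt c, if_pos rfl, hemptyc]
        rfl

-- B's pass-2 dedup loop computes set-of-first-occurrences of the pair stream's categories
theorem pvOrderEq (ps : List (String × String)) :
    ps.foldl (fun order p => if order.contains p.1 then order else order ++ [p.1]) []
    = PySem.Set.ofList (ps.map Prod.fst) := by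
  rw [PySem.Set.ofList_eq_foldl, List.foldl_map]
  apply pvFoldlCongrInv (fun _ => True) _ _ _ _ trivial ?_ (fun _ _ _ => trivial)
  intro acc p _
  rw [PySem.Set.add_eq_ite]
  by_cases h : p.1 ∈ acc <;> simp [h]

-- A's fold over documents is the pvStep-fold over the pair stream
theorem pvAFold (documents : List (List (String × String))) :
    documents.foldl (fun category_index doc =>
      let url := pvDocGet doc "url" ""
      let title := PySem.Str.lower (pvDocGet doc "title" "")
      let description := PySem.Str.lower (pvDocGet doc "description" "")
      let categories_found : List String :=
        pvCategoryKeywords.foldl (fun acc ck =>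
          if ck.2.any (fun kw => PySem.Str.isIn kw title || PySem.Str.isIn kw description)
          then acc ++ [ck.1] else acc) []
      let categories_found := if categories_found = [] then ["other"] else categories_found
      categories_found.foldl (fun ci cat =>
        let ci := if ci.contains cat then ci else ci.insert cat []
        let cur := ci.getD cat []
        if cur.contains url then ci else ci.insert cat (cur ++ [url])) category_index)
      PySem.Dict.empty
    = (pvPairs documents).foldl pvStep PySem.Dict.empty := by
  unfold pvPairs
  rw [List.foldl_flatMap]
  apply pvFoldlCongrInv (fun d : PySem.Dict String (List String) => d.keys.Nodup)
  · simp [PySem.Dict.keys, PySem.Dict.empty]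
  · intro d doc hn
    simp only [pvCatsEq doc, List.foldl_map]
    exact pvFoldlCongrInv (fun d : PySem.Dict String (List String) => d.keys.Nodup) _ _ _ d hn
      (fun b a hb => pvStepEq b a _ hb) (fun b a hb => pvInsertNodup b _ _ hb)
  · intro d doc hn
    exact pvFoldlPres (fun d : PySem.Dict String (List String) => d.keys.Nodup) _ _ _ hn
      (fun b a hb => pvInsertNodup b _ _ hb)

-- ===== VERDICT (by name: the statement is the Claim_ definition above) =====
theorem create_category_index_spec : Claim_equal_create_category_index := by
  intro documents _
  unfold Spec_create_category_index create_category_index create_category_index_alt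
  have hB : documents.foldl (fun assignments doc =>
      let text := PySem.Str.lower (pvDocGet doc "title" "") ++ "\n" ++ PySem.Str.lower (pvDocGet doc "description" "")
      let cats := (pvCategoryKeywords.filter (fun ck => ck.2.any (fun kw => PySem.Str.isIn kw text))).map (fun ck => ck.1)
      assignments ++ (if cats = [] then ["other"] else cats).map (fun c => (c, pvDocGet doc "url" ""))) []
      = pvPairs documents := by
    show documents.foldl (fun assignments doc =>
      assignments ++ (if pvCats doc = [] then ["other"] else pvCats doc).map
        (fun c => (c, pvDocGet doc "url" ""))) [] = _
    rw [PySem.List.foldl_append_eq_flatMap]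
    rfl
  show (documents.foldl (fun category_index doc =>
      let url := pvDocGet doc "url" ""
      let title := PySem.Str.lower (pvDocGet doc "title" "")
      let description := PySem.Str.lower (pvDocGet doc "description" "")
      let categories_found : List String :=
        pvCategoryKeywords.foldl (fun acc ck =>
          if ck.2.any (fun kw => PySem.Str.isIn kw title || PySem.Str.isIn kw description)
          then acc ++ [ck.1] else acc) []
      let categories_found := if categories_found = [] then ["other"] else categories_found
      categories_found.foldl (fun ci cat =>
        let ci := if ci.contains cat then ci else ci.insert cat []
        let cur := ci.getD cat []
        if cur.contains url then ci else ci.insert cat (cur ++ [url])) category_index)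
      PySem.Dict.empty).items.map (fun p => (p.1, PySem.List.sorted p.2 (fun x => x) false))
    = ((documents.foldl (fun assignments doc =>
        let text := PySem.Str.lower (pvDocGet doc "title" "") ++ "\n" ++ PySem.Str.lower (pvDocGet doc "description" "")
        let cats := (pvCategoryKeywords.filter (fun ck => ck.2.any (fun kw => PySem.Str.isIn kw text))).map (fun ck => ck.1)
        assignments ++ (if cats = [] then ["other"] else cats).map (fun c => (c, pvDocGet doc "url" ""))) []).foldl
          (fun order p => if order.contains p.1 then order else order ++ [p.1]) []).map (fun c =>
      (c, PySem.List.sorted (PySem.Set.ofList (((documents.foldl (fun assignments doc =>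
        let text := PySem.Str.lower (pvDocGet doc "title" "") ++ "\n" ++ PySem.Str.lower (pvDocGet doc "description" "")
        let cats := (pvCategoryKeywords.filter (fun ck => ck.2.any (fun kw => PySem.Str.isIn kw text))).map (fun ck => ck.1)
        assignments ++ (if cats = [] then ["other"] else cats).map (fun c => (c, pvDocGet doc "url" ""))) []).filter
          (fun p => p.1 == c)).map (fun p => p.2))) (fun x => x) false))
  rw [hB, pvAFold documents, pvFoldItems, pvOrderEq, List.map_map]
  rfl
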